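-- pv_equiv track=rewrite | github.com/mgtezak/Advent_of_Code | 2015/Day_25.py | get_n_iter
-- ===== SOURCE A (Python) =====
-- def get_n_iter(x: int, y: int) -> int:
--     col = row = i = 1
--     while (col, row) != (x, y):
--         if col > 1:
--             row += 1
--             col -= 1
--         else:
--             col = row + 1
--             row = 1
--         i += 1
--     return i
-- ===== SOURCE B (Python) =====
-- def get_n_iter(x: int, y: int) -> int:
--     n = x + y - 1
--     return n * (n - 1) // 2 + y
-- ===== Notes on version B (the rewrite author's own statement) =====
-- stated objective: faster
-- what changed: Replaces the step-by-step diagonal walk with the closed-form triangular-number index n=x+y-1, i=n(n-1)/2+y.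
import Mathlib
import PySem

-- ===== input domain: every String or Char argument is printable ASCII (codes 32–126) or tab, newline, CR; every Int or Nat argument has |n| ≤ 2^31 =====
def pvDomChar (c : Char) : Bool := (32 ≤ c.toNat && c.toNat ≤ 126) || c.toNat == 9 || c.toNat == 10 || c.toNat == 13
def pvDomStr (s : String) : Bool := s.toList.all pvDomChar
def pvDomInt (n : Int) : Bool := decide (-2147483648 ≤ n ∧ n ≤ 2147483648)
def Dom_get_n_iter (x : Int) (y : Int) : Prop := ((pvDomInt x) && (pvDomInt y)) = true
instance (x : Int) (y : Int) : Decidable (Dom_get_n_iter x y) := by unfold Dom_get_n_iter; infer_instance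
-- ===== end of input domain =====

-- B replaces A's step-by-step diagonal walk with the closed-form index n = x+y-1, i = n(n-1)/2 + y (O(1) instead of O((x+y)^2)).


-- ===== PORT A =====
-- A's while loop, transliterated with a fuel guard making it total in Lean; the
-- fuel (x+y)^2 is proved sufficient on Pre_ (where the Python loop terminates).
def getNIterLoop (fuel : Nat) (col row i : Int) (x y : Int) : Int :=
  match fuel with
  | 0 => i
  | Nat.succ f =>
    if (col, row) = (x, y) then i
    else if col > 1 then getNIterLoop f (col - 1) (row + 1) (i + 1) x y
    else getNIterLoop f (row + 1) 1 (i + 1) x y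

def get_n_iter (x : Int) (y : Int) : Int :=
  getNIterLoop ((x + y) * (x + y)).toNat 1 1 1 x y

-- ===== PORT B =====
def get_n_iter_alt (x : Int) (y : Int) : Int :=
  let n := x + y - 1
  PySem.Int.floordiv (n * (n - 1)) 2 + y

-- ===== PRECONDITION & SPEC =====
-- A's while loop never reaches any cell with x < 1 or y < 1, so A diverges there; Pre_ is exactly where A returns.
def Pre_get_n_iter (x : Int) (y : Int) : Prop := 1 ≤ x ∧ 1 ≤ y
instance (x : Int) (y : Int) : Decidable (Pre_get_n_iter x y) := by unfold Pre_get_n_iter; infer_instance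
def pvWitness_get_n_iter : Int × Int := (3, 4)

def Spec_get_n_iter (x : Int) (y : Int) (out : Int) : Prop := out = get_n_iter_alt x y
instance (x : Int) (y : Int) (out : Int) : Decidable (Spec_get_n_iter x y out) := by unfold Spec_get_n_iter; infer_instance

-- ===== CLAIM (what is proved, stated in full; the proofs are below) =====
def Claim_equal_get_n_iter : Prop := ∀ (x : Int) (y : Int), Dom_get_n_iter x y → Pre_get_n_iter x y → Spec_get_n_iter x y (get_n_iter x y)

-- ===== LEMMAS AND PROOFS =====

-- Doubled diagonal index of cell (c, r): 2 * (its 1-based iteration index).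
def pvKey (c r : Int) : Int := (c + r - 1) * (c + r - 2) + 2 * r

-- triangle-number monotonicity, used to compare keys across diagonals
lemma pvTriMono {a b : Int} (ha : 1 ≤ a) (hab : a + 1 ≤ b) :
    a * (a + 1) ≤ (b - 1) * b := by nlinarith

lemma pvKey_lt {col row x y : Int} (hc : 1 ≤ col) (hr : 1 ≤ row) (hy : 1 ≤ y)
    (hd : col + row < x + y) : pvKey col row < pvKey x y := by
  unfold pvKey
  have h1 : (col + row - 1) * (col + row - 2) + 2 * row
      ≤ (col + row - 1) * (col + row) := by nlinarith
  have h2 : (col + row - 1) * (col + row) ≤ (x + y - 2) * (x + y - 1) := by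
    have := pvTriMono (a := col + row - 1) (b := x + y - 1) (by omega) (by omega)
    calc (col + row - 1) * (col + row) = (col + row - 1) * ((col + row - 1) + 1) := by ring
      _ ≤ (x + y - 1 - 1) * (x + y - 1) := this
      _ = (x + y - 2) * (x + y - 1) := by ring
  nlinarith

-- Main loop invariant: from a valid state whose key precedes the target's by 2*d,
-- the loop takes exactly d more steps and returns i + d.
lemma pvLoop_spec (d : Nat) : ∀ (fuel : Nat) (col row i x y : Int),
    d ≤ fuel → 1 ≤ col → 1 ≤ row → 1 ≤ x → 1 ≤ y →
    (col + row < x + y ∨ (col + row = x + y ∧ row ≤ y)) →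
    pvKey x y - pvKey col row = 2 * d →
    getNIterLoop fuel col row i x y = i + d := by
  induction d with
  | zero =>
    intro fuel col row i x y hfuel hc hr hx hy hord hkey
    have heq : col = x ∧ row = y := by
      rcases hord with h | ⟨hsum, hrow⟩
      · exact absurd hkey (by have := pvKey_lt hc hr hy h; omega)
      · unfold pvKey at hkey
        have hprod : (col + row - 1) * (col + row - 2) = (x + y - 1) * (x + y - 2) := by
          rw [hsum]
        push_cast at hkey
        constructor <;> linarith
    cases fuel with
    | zero => simp [getNIterLoop]
    | succ f => simp [getNIterLoop, heq.1, heq.2]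
  | succ d ih =>
    intro fuel col row i x y hfuel hc hr hx hy hord hkey
    cases fuel with
    | zero => omega
    | succ f =>
      have hne : ¬ ((col, row) = (x, y)) := by
        intro h
        have h1 : col = x := congrArg Prod.fst h
        have h2 : row = y := congrArg Prod.snd h
        subst h1; subst h2; omega
      by_cases hcol : col > 1
      · have hstep : pvKey (col - 1) (row + 1) = pvKey col row + 2 := by
          unfold pvKey; ring
        have hord' : (col - 1) + (row + 1) < x + y ∨
            ((col - 1) + (row + 1) = x + y ∧ row + 1 ≤ y) := by
          rcases hord with h | ⟨hsum, hrow⟩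
          · left; omega
          · right
            refine ⟨by omega, ?_⟩
            -- on the same diagonal the key difference is 2*(y - row) = 2*(d+1) > 0
            unfold pvKey at hkey
            have hprod : (col + row - 1) * (col + row - 2) = (x + y - 1) * (x + y - 2) := by
              rw [hsum]
            push_cast at hkey
            linarith [Int.natCast_nonneg d]
        rw [show getNIterLoop (Nat.succ f) col row i x y
              = getNIterLoop f (col - 1) (row + 1) (i + 1) x y by
            simp [getNIterLoop, hne, hcol]]
        have := ih f (col - 1) (row + 1) (i + 1) x y (by omega) (by omega) (by omega)
          hx hy hord' (by omega)
        rw [this]; push_cast; ring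
      · have hcol1 : col = 1 := by omega
        subst hcol1
        have hstep : pvKey (row + 1) 1 = pvKey 1 row + 2 := by
          unfold pvKey; ring
        have hord' : (row + 1) + 1 < x + y ∨
            ((row + 1) + 1 = x + y ∧ (1:Int) ≤ y) := by
          rcases hord with h | ⟨hsum, hrow⟩
          · omega
          · -- same diagonal with col = 1 forces (1, row) = (x, y), contradicting key gap
            exfalso
            have hylerow : y ≤ row := by omega
            unfold pvKey at hkey
            have hprod : (1 + row - 1) * (1 + row - 2) = (x + y - 1) * (x + y - 2) := by
              rw [hsum]
            push_cast at hkey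
            linarith [Int.natCast_nonneg d]
        rw [show getNIterLoop (Nat.succ f) 1 row i x y
              = getNIterLoop f (row + 1) 1 (i + 1) x y by
            simp [getNIterLoop, hne]]
        have := ih f (row + 1) 1 (i + 1) x y (by omega) (by omega) (by omega)
          hx hy hord' (by omega)
        rw [this]; push_cast; ring


-- ===== VERDICT (by name: the statement is the Claim_ definition above) =====
theorem get_n_iter_spec : Claim_equal_get_n_iter := by
  intro x y _ hpre
  obtain ⟨hx, hy⟩ := hpre
  unfold Spec_get_n_iter get_n_iter get_n_iter_alt
  -- the total number of steps d, as a Nat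
  set P : Int := (x + y - 1) * (x + y - 2) with hP
  have hPeven : 2 * ((x + y - 1) * (x + y - 2) / 2) = P := by
    rcases Int.even_mul_succ_self (x + y - 2) with ⟨k, hk⟩
    have : P = 2 * k := by rw [hP]; nlinarith
    omega
  have hkey : pvKey x y - pvKey 1 1 = P + 2 * y - 2 := by unfold pvKey; ring
  have hPnonneg : 0 ≤ P := mul_nonneg (by omega) (by omega)
  have hd2 : pvKey x y - pvKey 1 1 = 2 * ((P + 2 * y - 2) / 2) := by omega
  set d : Nat := ((P + 2 * y - 2) / 2).toNat with hdN
  have hdval : (d : Int) = (P + 2 * y - 2) / 2 := by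
    rw [hdN]; exact Int.toNat_of_nonneg (by omega)
  have hfuel : d ≤ ((x + y) * (x + y)).toNat := by
    have hPle : P ≤ (x + y) * (x + y) - 3 * (x + y) + 2 := by rw [hP]; nlinarith
    have hnn : 0 ≤ (x + y) * (x + y) := mul_self_nonneg _
    omega
  have := pvLoop_spec d ((x + y) * (x + y)).toNat 1 1 1 x y hfuel
    (by omega) (by omega) hx hy (by omega) (by rw [hd2, hdval])
  rw [this]
  show 1 + (d : Int) = PySem.Int.floordiv ((x + y - 1) * ((x + y - 1) - 1)) 2 + y
  rw [PySem.Int.floordiv_eq_ediv_of_pos (by omega)]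
  have hn : (x + y - 1) * ((x + y - 1) - 1) = P := by rw [hP]; ring
  rw [hn]
  omega
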